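-- pv_equiv track=rewrite | github.com/deok2kim/algorithm | algo_study/1118/13549. 숨바꼭질 3.py | zero_one_bfs
-- ===== SOURCE A (Python) =====
-- from _collections import deque
--
-- def zero_one_bfs(n, k):
--     q = deque()
--     q.append(n)
--
--     MX = 100001
--     key = [0] * MX
--     while q:
--         x = q.popleft()
--
--         if x == k:
--             return key[x]
--
--         for nx in (x - 1, x + 1, x * 2):
--             if 0 <= nx < MX and not key[nx]:
--                 if nx == x * 2 and x:
--                     key[nx] = key[x]
--                     q.appendleft(nx)
--                 else:
--                     key[nx] = key[x] + 1
--                     q.append(nx)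
-- ===== SOURCE B (Python) =====
-- def zero_one_bfs(n, k):
--     # Unit-cost BFS over a cursor-consumed FIFO of paid (+1/-1) discoveries;
--     # each free doubling move is explored immediately by depth-first recursion,
--     # so no deque (and no front-insertion at all) is needed.
--     MX = 100001
--     key = [0] * MX
--     fifo = []
--
--     def visit(x):
--         # explore x and, depth-first, everything reached from it by free doublings
--         if x == k:
--             return key[x]
--         free = []
--         for nx in (x - 1, x + 1, x * 2):
--             if 0 <= nx < MX and not key[nx]:
--                 if nx == x * 2 and x:
--                     key[nx] = key[x]
--                     free.append(nx)
--                 else: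
--                     key[nx] = key[x] + 1
--                     fifo.append(nx)
--         for nx in reversed(free):
--             r = visit(nx)
--             if r is not None:
--                 return r
--         return None
--
--     r = visit(n)
--     i = 0
--     while r is None and i < len(fifo):
--         r = visit(fifo[i])
--         i += 1
--     return r
-- ===== Notes on version B (the rewrite author's own statement) =====
-- stated objective: alternative
-- what changed: Replaces the deque-based 0-1 BFS by a plain unit-cost BFS over a cursor-consumed FIFO of paid (+/-1) discoveries, where each free doubling move is explored immediately by depth-first recursion, so the deque and all front insertions disappear.
-- outside the precondition, e.g. on zero_one_bfs(-3, -3): A returns 0, B returns 0; on zero_one_bfs(-1, 3): A returns 3, B returns 3; on zero_one_bfs(-2, 7): A returns None, B returns None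
import Mathlib
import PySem

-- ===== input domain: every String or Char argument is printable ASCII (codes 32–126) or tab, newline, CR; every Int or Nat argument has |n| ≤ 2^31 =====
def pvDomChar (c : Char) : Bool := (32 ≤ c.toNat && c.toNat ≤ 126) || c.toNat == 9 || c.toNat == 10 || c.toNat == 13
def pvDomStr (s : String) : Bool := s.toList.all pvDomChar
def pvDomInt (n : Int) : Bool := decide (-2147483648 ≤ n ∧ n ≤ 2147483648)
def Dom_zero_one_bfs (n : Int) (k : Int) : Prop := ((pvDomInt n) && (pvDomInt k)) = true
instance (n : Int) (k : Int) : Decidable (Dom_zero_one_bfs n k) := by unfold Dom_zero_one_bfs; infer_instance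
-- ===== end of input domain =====

-- B replaces A's deque-driven 0-1 BFS by a unit-cost BFS over a FIFO of paid (±1)
-- discoveries in which every free doubling move is explored immediately by depth-first
-- recursion, so the deque and all front insertions disappear; objective: alternative.
-- Array accesses are exact for indices in [0, 100001), the only ones reachable under Pre_.

-- shared by both ports: Python's 'key[i]' read/write (both sources index the same way)
def kget (a : Array Int) (i : Int) : Int := a[i.toNat]!
def kset (a : Array Int) (i : Int) (v : Int) : Array Int := a.set! i.toNat v

-- ===== PORT A =====

-- one neighbour of the for-loop: 'if 0 <= nx < MX and not key[nx]: …'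
def handleA (x : Int) (st : List Int × Array Int) (nx : Int) : List Int × Array Int :=
  let (q, key) := st
  if 0 ≤ nx ∧ nx < 100001 ∧ kget key nx = 0 then
    if nx = x * 2 ∧ x ≠ 0 then (nx :: q, kset key nx (kget key x))
    else (q ++ [nx], kset key nx (kget key x + 1))
  else st

-- the 'while q:' loop; fuel 300000 exceeds the total number of pops (each pop is paid
-- for by a key-cell write, and each cell is written at most twice: once with a level-0
-- value 0 and once with a positive value)
def stepA (fuel : Nat) (k : Int) (q : List Int) (key : Array Int) : Int :=
  match fuel with
  | 0 => -1
  | f + 1 =>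
    match q with
    | [] => -1
    | x :: q =>
      if x = k then kget key x
      else
        let st := List.foldl (handleA x) (q, key) [x - 1, x + 1, x * 2]
        stepA f k st.1 st.2

def zero_one_bfs (n : Int) (k : Int) : Int :=
  stepA 300000 k [n] (Array.replicate 100001 0)

-- ===== PORT B =====

-- Source B's inner for-loop: sort each admissible neighbour into the free (doubling) list
-- or the paid FIFO, writing its key
def visitRelax (x : Int) (st : List Int × List Int × Array Int) (nx : Int) :
    List Int × List Int × Array Int :=
  let (free, fifo, key) := st
  if 0 ≤ nx ∧ nx < 100001 ∧ kget key nx = 0 then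
    if nx = x * 2 ∧ x ≠ 0 then (free ++ [nx], fifo, kset key nx (kget key x))
    else (free, fifo ++ [nx], kset key nx (kget key x + 1))
  else st

-- Source B's recursive 'visit': result is (found value?, fifo, key, fuel consumed); the
-- fuel (one unit per visited node) is a port artifact making the recursion structural
mutual
def visitB (f : Nat) (k x : Int) (fifo : List Int) (key : Array Int) :
    Option Int × List Int × Array Int × Nat :=
  match f with
  | 0 => (none, fifo, key, 0)
  | f + 1 =>
    if x = k then (some (kget key x), fifo, key, 1)
    else
      let st := List.foldl (visitRelax x) ([], fifo, key) [x - 1, x + 1, x * 2]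
      -- 'for nx in reversed(free): r = visit(nx); if r is not None: return r'
      let r := visitList f k st.1.reverse st.2.1 st.2.2
      (r.1, r.2.1, r.2.2.1, 1 + r.2.2.2)
  termination_by (f, 0)
  decreasing_by exact Prod.Lex.left _ _ (by omega)

def visitList (f : Nat) (k : Int) (free fifo : List Int) (key : Array Int) :
    Option Int × List Int × Array Int × Nat :=
  match free with
  | [] => (none, fifo, key, 0)
  | c :: rest =>
    let r1 := visitB f k c fifo key
    match r1.1 with
    | some v => (some v, r1.2.1, r1.2.2.1, r1.2.2.2)
    | none =>
      let r := visitList (f - r1.2.2.2) k rest r1.2.1 r1.2.2.1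
      (r.1, r.2.1, r.2.2.1, r1.2.2.2 + r.2.2.2)
  termination_by (f, free.length + 1)
  decreasing_by
    · exact Prod.Lex.right _ (by simp)
    · rcases Nat.lt_or_ge (f - r1.2.2.2) f with h | h
      · exact Prod.Lex.left _ _ h
      · have he : f - r1.2.2.2 = f := by omega
        rw [he]
        exact Prod.Lex.right _ (by simp)
end

-- Source B's driving while-loop over the cursor-consumed FIFO ('None' is ported as -1,
-- reachable only outside Pre_)
def driveB (f : Nat) (k : Int) (rest : List Int) (key : Array Int) : Int :=
  match f, rest with
  | _, [] => -1
  | 0, _ :: _ => -1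
  | f0 + 1, x :: rest =>
    let r := visitB (f0 + 1) k x rest key
    match r.1 with
    | some v => v
    | none => driveB (f0 - (r.2.2.2 - 1)) k r.2.1 r.2.2.1
  termination_by f
  decreasing_by omega

def zero_one_bfs_alt (n : Int) (k : Int) : Int :=
  let r := visitB 300000 k n [] (Array.replicate 100001 0)
  match r.1 with
  | some v => v
  | none => driveB (300000 - r.2.2.2) k r.2.1 r.2.2.1

-- ===== PRECONDITION & SPEC =====
-- Pre_ restricts to the board [0, 100001) the problem fixes; outside it A usually raises
-- IndexError or returns None (no Int), and the few returns it still produces (e.g. a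
-- negative n == k answered 0 through negative-index wraparound) are indexing accidents.
def Pre_zero_one_bfs (n : Int) (k : Int) : Prop :=
  0 ≤ n ∧ n < 100001 ∧ 0 ≤ k ∧ k < 100001
instance (n : Int) (k : Int) : Decidable (Pre_zero_one_bfs n k) := by
  unfold Pre_zero_one_bfs; infer_instance

def pvWitness_zero_one_bfs : Int × Int := (5, 17)

def Spec_zero_one_bfs (n : Int) (k : Int) (out : Int) : Prop := out = zero_one_bfs_alt n k
instance (n : Int) (k : Int) (out : Int) : Decidable (Spec_zero_one_bfs n k out) := by
  unfold Spec_zero_one_bfs; infer_instance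

-- ===== CLAIM (what is proved, stated in full; the proofs are below) =====
def Claim_equal_zero_one_bfs : Prop :=
  ∀ (n : Int) (k : Int), Dom_zero_one_bfs n k → Pre_zero_one_bfs n k →
    Spec_zero_one_bfs n k (zero_one_bfs n k)

-- ===== LEMMAS AND PROOFS =====

-- A's continuation after one 'visit' subtree: return the found value, or keep popping
-- the untouched queue segment S followed by the updated FIFO
def contA (k : Int) (S : List Int) (r : Option Int × List Int × Array Int × Nat) (f : Nat) : Int :=
  match r.1 with
  | some v => v
  | none => stepA (f - r.2.2.2) k (S ++ r.2.1) r.2.2.1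

-- one neighbour step: A on the queue free.reverse ++ S ++ fifo mirrors B's three-way split
theorem handleA_visitRelax (x nx : Int) (free S fifo : List Int) (key : Array Int) :
    handleA x (free.reverse ++ (S ++ fifo), key) nx =
      ((visitRelax x (free, fifo, key) nx).1.reverse ++
        (S ++ (visitRelax x (free, fifo, key) nx).2.1),
       (visitRelax x (free, fifo, key) nx).2.2) := by
  simp only [handleA, visitRelax]
  split_ifs <;> simp

theorem fold_frame (l : List Int) (x : Int) (free S fifo : List Int) (key : Array Int) :
    List.foldl (handleA x) (free.reverse ++ (S ++ fifo), key) l =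
      ((List.foldl (visitRelax x) (free, fifo, key) l).1.reverse ++
        (S ++ (List.foldl (visitRelax x) (free, fifo, key) l).2.1),
       (List.foldl (visitRelax x) (free, fifo, key) l).2.2) := by
  induction l generalizing free fifo key with
  | nil => simp
  | cons a t ih =>
    simp only [List.foldl_cons]
    rw [handleA_visitRelax]
    rcases h : visitRelax x (free, fifo, key) a with ⟨free', fifo', key'⟩
    exact ih free' fifo' key'

-- the simulation: each 'visit' call consumes exactly the pops A spends on the same
-- subtree, with any queue segment S as an untouched frame
theorem visit_sim (f : Nat) (k : Int) :
    (∀ (x : Int) (S fifo : List Int) (key : Array Int),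
       stepA f k (x :: (S ++ fifo)) key = contA k S (visitB f k x fifo key) f
       ∧ (visitB f k x fifo key).2.2.2 ≤ f
       ∧ (f ≠ 0 → 1 ≤ (visitB f k x fifo key).2.2.2))
  ∧ (∀ (free S fifo : List Int) (key : Array Int),
       stepA f k (free ++ (S ++ fifo)) key = contA k S (visitList f k free fifo key) f
       ∧ (visitList f k free fifo key).2.2.2 ≤ f) := by
  induction f using Nat.strong_induction_on with
  | _ f ih =>
  have hL : ∀ (x : Int) (S fifo : List Int) (key : Array Int),
      stepA f k (x :: (S ++ fifo)) key = contA k S (visitB f k x fifo key) f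
      ∧ (visitB f k x fifo key).2.2.2 ≤ f
      ∧ (f ≠ 0 → 1 ≤ (visitB f k x fifo key).2.2.2) := by
    intro x S fifo key
    match f with
    | 0 => simp [stepA, visitB, contA]
    | f + 1 =>
      by_cases hk : x = k
      · simp [stepA, visitB, contA, hk]
      · have hM := (ih f (by omega)).2
        simp only [stepA, visitB, hk, if_neg, not_false_iff]
        have hfold := fold_frame [x - 1, x + 1, x * 2] x [] S fifo key
        simp only [List.reverse_nil, List.nil_append] at hfold
        rcases h : List.foldl (visitRelax x) ([], fifo, key) [x - 1, x + 1, x * 2]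
          with ⟨F, fifo2, key2⟩
        rw [h] at hfold
        rw [hfold]
        obtain ⟨hMeq, hMle⟩ := hM F.reverse S fifo2 key2
        rcases hr : visitList f k F.reverse fifo2 key2 with ⟨ro, fifo3, key3, c⟩
        rw [hr] at hMeq hMle
        have hMle' : c ≤ f := by simpa using hMle
        rw [hMeq]
        cases ro with
        | none =>
          refine ⟨?_, by omega, fun _ => by omega⟩
          simp only [contA]
          have hsub : f + 1 - (1 + c) = f - c := by omega
          rw [hsub]

        | some v => exact ⟨by simp [contA], by omega, fun _ => by omega⟩
  refine ⟨hL, ?_⟩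
  intro free
  induction free with
  | nil =>
    intro S fifo key
    constructor
    · simp [visitList, contA]
    · simp [visitList]
  | cons c rest ihfree =>
    intro S fifo key
    have hc := hL c (rest ++ S) fifo key
    rcases hv : visitB f k c fifo key with ⟨ro, fifo1, key1, c1⟩
    rw [hv] at hc
    obtain ⟨hceq, hcle0, _⟩ := hc
    have hcle : c1 ≤ f := by simpa using hcle0
    have hq : (c :: rest) ++ (S ++ fifo) = c :: ((rest ++ S) ++ fifo) := by simp
    cases ro with
    | some v =>
      constructor
      · rw [hq, hceq]; simp [visitList, hv, contA]
      · simp only [visitList, hv]; simpa using hcle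
    | none =>
      -- A continues on (rest ++ S) ++ fifo1 with fuel f - c1
      have hrest : stepA (f - c1) k (rest ++ (S ++ fifo1)) key1 =
          contA k S (visitList (f - c1) k rest fifo1 key1) (f - c1)
          ∧ (visitList (f - c1) k rest fifo1 key1).2.2.2 ≤ f - c1 := by
        by_cases hc1 : c1 = 0
        · subst hc1; simpa using ihfree S fifo1 key1
        · exact (ih (f - c1) (by omega)).2 rest S fifo1 key1
      obtain ⟨hre, hrle⟩ := hrest
      rcases hr2 : visitList (f - c1) k rest fifo1 key1 with ⟨ro2, fifo2, key2, c2⟩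
      rw [hr2] at hre hrle
      have hrle' : c2 ≤ f - c1 := by simpa using hrle
      constructor
      · rw [hq, hceq]
        simp only [contA, List.append_assoc] at hre ⊢
        rw [hre]
        simp only [visitList, hv, hr2]
        cases ro2 with
        | some v => simp
        | none =>
          simp only
          have : f - c1 - c2 = f - (c1 + c2) := by omega
          rw [this]
      · simp only [visitList, hv, hr2]
        omega

-- the driver: A's remaining loop equals Source B's cursor while-loop
theorem drive_sim (f : Nat) (k : Int) :
    ∀ (rest : List Int) (key : Array Int), stepA f k rest key = driveB f k rest key := by
  induction f using Nat.strong_induction_on with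
  | _ f ih =>
  intro rest key
  match f, rest with
  | 0, [] => simp [stepA, driveB]
  | 0, x :: rest => simp [stepA, driveB]
  | f + 1, [] => simp [stepA, driveB]
  | f0 + 1, x :: rest =>
    obtain ⟨heq, hle, hone⟩ := (visit_sim (f0 + 1) k).1 x [] rest key
    simp only [List.nil_append] at heq
    rw [heq]
    rcases hv : visitB (f0 + 1) k x rest key with ⟨ro, fifo1, key1, c1⟩
    rw [hv] at hle hone
    simp only at hle hone
    have h1 : 1 ≤ c1 := hone (by omega)
    cases ro with
    | some v => simp [contA, driveB, hv]
    | none =>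
      simp only [contA, driveB, hv, List.nil_append]
      have : f0 + 1 - c1 = f0 - (c1 - 1) := by omega
      rw [this]
      exact ih (f0 - (c1 - 1)) (by omega) fifo1 key1

-- ===== VERDICT (by name: the statement is the Claim_ definition above) =====
theorem zero_one_bfs_spec : Claim_equal_zero_one_bfs := by
  intro n k _ _
  unfold Spec_zero_one_bfs zero_one_bfs zero_one_bfs_alt
  obtain ⟨heq, _, _⟩ := (visit_sim 300000 k).1 n [] [] (Array.replicate 100001 0)
  simp only [List.append_nil] at heq
  rw [show ([n] : List Int) = n :: ([] : List Int) from rfl] at *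
  rw [heq]
  rcases hv : visitB 300000 k n [] (Array.replicate 100001 0) with ⟨ro, fifo1, key1, c1⟩
  cases ro with
  | some v => simp [contA]
  | none =>
    simp only [contA, List.nil_append]
    exact drive_sim _ k fifo1 key1
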